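-- pv_equiv track=rewrite | github.com/MaratAG/GB_Pythons_Algoritms | les_4_task_1.py | get_list_max_numbers
-- ===== SOURCE A (Python) =====
-- def get_list_max_numbers(frequency_items_in_list):
--     max_numbers = {}
--     for key, value in frequency_items_in_list.items():
--         if value in max_numbers.keys():
--             max_numbers[value].append(key)
--         else:
--             max_numbers[value] = [key]
--
--     key_max_numbers = 0
--     list_max_numbers = []
--
--     for key, value in max_numbers.items():
--         if key > key_max_numbers:
--             key_max_numbers = key
--             list_max_numbers = value
--
--     return key_max_numbers, ', '.join(map(str, list_max_numbers))
-- ===== SOURCE B (Python) =====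
-- def get_list_max_numbers(frequency_items_in_list):
--     max_value = 0
--     for value in frequency_items_in_list.values():
--         if value > max_value:
--             max_value = value
--     if max_value > 0:
--         keys = [str(key) for key, value in frequency_items_in_list.items()
--                 if value == max_value]
--     else:
--         keys = []
--     return max_value, ', '.join(keys)
-- ===== Notes on version B (the rewrite author's own statement) =====
-- stated objective: simpler
-- what changed: Drops A's inverted value->keys grouping dict entirely: B takes one running max over the values (starting at 0, strict >) and then selects the matching keys with a single filtering comprehension, instead of building an index dict and scanning its items.
import Mathlib
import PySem

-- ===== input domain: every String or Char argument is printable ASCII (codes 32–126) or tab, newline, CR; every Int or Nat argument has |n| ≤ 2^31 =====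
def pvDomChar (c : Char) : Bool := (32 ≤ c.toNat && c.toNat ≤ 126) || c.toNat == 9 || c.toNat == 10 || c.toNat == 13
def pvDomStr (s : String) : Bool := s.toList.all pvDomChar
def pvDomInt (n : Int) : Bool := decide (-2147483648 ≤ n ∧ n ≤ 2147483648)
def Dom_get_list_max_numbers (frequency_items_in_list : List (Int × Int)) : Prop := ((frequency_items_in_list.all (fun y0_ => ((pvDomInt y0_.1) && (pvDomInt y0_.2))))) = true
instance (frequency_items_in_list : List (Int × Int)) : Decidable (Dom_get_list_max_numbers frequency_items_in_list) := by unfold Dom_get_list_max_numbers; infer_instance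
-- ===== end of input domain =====

-- B replaces A's inverted value->keys grouping dict by a single running max over the
-- values followed by one filtering pass over the items (objective: simpler).


-- ===== PORT A =====
-- the grouping loop: for key, value in …: if value in max_numbers: append else new singleton
def pvStepA (d : PySem.Dict Int (List Int)) (kv : Int × Int) : PySem.Dict Int (List Int) :=
  if d.contains kv.2 then d.modify kv.2 [] (fun ks => ks ++ [kv.1])
  else d.insert kv.2 [kv.1]

def get_list_max_numbers (frequency_items_in_list : List (Int × Int)) : Int × String :=
  let max_numbers : PySem.Dict Int (List Int) :=
    frequency_items_in_list.foldl pvStepA PySem.Dict.empty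
  let res : Int × List Int :=
    max_numbers.items.foldl
      (fun acc kv => if kv.1 > acc.1 then (kv.1, kv.2) else acc) (0, [])
  (res.1, PySem.Str.join ", " (res.2.map PySem.Int.toStr))

-- ===== PORT B =====
def get_list_max_numbers_alt (frequency_items_in_list : List (Int × Int)) : Int × String :=
  let max_value : Int :=
    frequency_items_in_list.foldl (fun m kv => if kv.2 > m then kv.2 else m) 0
  let keys : List String :=
    if max_value > 0 then
      (frequency_items_in_list.filter (fun kv => kv.2 == max_value)).map
        (fun kv => PySem.Int.toStr kv.1)
    else []
  (max_value, PySem.Str.join ", " keys)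

-- ===== PRECONDITION & SPEC =====
def Spec_get_list_max_numbers (frequency_items_in_list : List (Int × Int)) (out : Int × String) : Prop := out = get_list_max_numbers_alt frequency_items_in_list
instance (frequency_items_in_list : List (Int × Int)) (out : Int × String) : Decidable (Spec_get_list_max_numbers frequency_items_in_list out) := by unfold Spec_get_list_max_numbers; infer_instance

-- ===== CLAIM (what is proved, stated in full; the proofs are below) =====
def Claim_equal_get_list_max_numbers : Prop := ∀ (frequency_items_in_list : List (Int × Int)), Dom_get_list_max_numbers frequency_items_in_list → Spec_get_list_max_numbers frequency_items_in_list (get_list_max_numbers frequency_items_in_list)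

-- ===== LEMMAS AND PROOFS =====

-- the keys grouped under value v are exactly the keys of the entries with that value, in order
theorem pvGetD_foldA (l : List (Int × Int)) (d : PySem.Dict Int (List Int)) (v : Int) :
    (l.foldl pvStepA d).getD v [] =
      d.getD v [] ++ (l.filter (fun kv => kv.2 == v)).map (·.1) := by
  induction l generalizing d with
  | nil => simp
  | cons kv rest ih =>
    simp only [List.foldl_cons, ih, List.filter_cons]
    by_cases hv : kv.2 = v
    · subst hv
      by_cases hc : d.contains kv.2
      · simp [pvStepA, hc]
      · simp [pvStepA, hc,
          PySem.Dict.getD_of_not_contains d ([] : List Int) (by simpa using hc)]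
    · by_cases hc : d.contains kv.2
      · simp [pvStepA, hc, PySem.Dict.getD_modify, hv, Ne.symm hv]
      · simp [pvStepA, hc, PySem.Dict.getD_insert, hv, Ne.symm hv]

theorem pvMemKeys_foldA (l : List (Int × Int)) (d : PySem.Dict Int (List Int)) (v : Int) :
    v ∈ (l.foldl pvStepA d).keys ↔ v ∈ d.keys ∨ v ∈ l.map (·.2) := by
  induction l generalizing d with
  | nil => simp
  | cons kv rest ih =>
    simp only [List.foldl_cons, ih, List.map_cons, List.mem_cons]
    by_cases hc : d.contains kv.2
    · have : (pvStepA d kv).keys = d.keys := by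
        rw [pvStepA, if_pos hc, PySem.Dict.keys_modify,
          PySem.Dict.keys_insert_of_contains d _ hc]
      rw [this]
      constructor
      · tauto
      · rintro (h | h | h) <;> try tauto
        subst h; exact Or.inl ((PySem.Dict.contains_iff_mem_keys d kv.2).1 hc)
    · have : v ∈ (pvStepA d kv).keys ↔ v = kv.2 ∨ v ∈ d.keys := by
        simp [pvStepA, hc, PySem.Dict.mem_keys_insert]
      rw [this]; tauto

theorem pvNodupKeys_foldA (l : List (Int × Int)) (d : PySem.Dict Int (List Int))
    (h : d.keys.Nodup) : (l.foldl pvStepA d).keys.Nodup := by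
  induction l generalizing d with
  | nil => simpa
  | cons kv rest ih =>
    apply ih
    by_cases hc : d.contains kv.2
    · have : (pvStepA d kv).keys = d.keys := by
        rw [pvStepA, if_pos hc, PySem.Dict.keys_modify,
          PySem.Dict.keys_insert_of_contains d _ hc]
      rw [this]; exact h
    · rw [pvStepA, if_neg hc]
      exact PySem.Dict.nodup_keys_insert _ _ _ h

-- running maximum: the initial value is a lower bound
theorem pvInit_le_maxfold (ys : List Int) (a : Int) :
    a ≤ ys.foldl (fun b x => if x > b then x else b) a := by
  induction ys generalizing a with
  | nil => simp
  | cons y ys ih =>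
    simp only [List.foldl_cons]
    split_ifs with h
    · exact le_trans (le_of_lt h) (ih y)
    · exact ih a

-- running maximum: every element is a lower bound of the result
theorem pvMem_le_maxfold (ys : List Int) (a : Int) (x : Int) (hx : x ∈ ys) :
    x ≤ ys.foldl (fun b x => if x > b then x else b) a := by
  induction ys generalizing a with
  | nil => cases hx
  | cons y ys ih =>
    simp only [List.foldl_cons]
    rcases List.mem_cons.1 hx with rfl | hx
    · split_ifs with h
      · exact pvInit_le_maxfold ys x
      · exact le_trans (not_lt.1 h) (pvInit_le_maxfold ys a)
    · split_ifs with h <;> exact ih _ hx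

-- running maximum: the result is the initial value or an element
theorem pvMaxfold_cases (ys : List Int) (a : Int) :
    ys.foldl (fun b x => if x > b then x else b) a = a ∨
      ys.foldl (fun b x => if x > b then x else b) a ∈ ys := by
  induction ys generalizing a with
  | nil => simp
  | cons y ys ih =>
    simp only [List.foldl_cons, List.mem_cons]
    split_ifs with h
    · rcases ih y with h' | h'
      · exact Or.inr (Or.inl h')
      · exact Or.inr (Or.inr h')
    · rcases ih a with h' | h'
      · exact Or.inl h'
      · exact Or.inr (Or.inr h')

-- two lists with the same members have the same running maximum
theorem pvMaxfold_congr (xs ys : List Int) (a : Int)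
    (h : ∀ x, x ∈ xs ↔ x ∈ ys) :
    xs.foldl (fun b x => if x > b then x else b) a =
      ys.foldl (fun b x => if x > b then x else b) a := by
  apply le_antisymm
  · rcases pvMaxfold_cases xs a with h' | h'
    · rw [h']; exact pvInit_le_maxfold ys a
    · exact pvMem_le_maxfold ys a _ ((h _).1 h')
  · rcases pvMaxfold_cases ys a with h' | h'
    · rw [h']; exact pvInit_le_maxfold xs a
    · exact pvMem_le_maxfold xs a _ ((h _).2 h')

-- A's selection loop over (value, keys) pairs whose snd is determined by fst:
-- it returns the running maximum of the fsts together with F of that maximum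
theorem pvPickFold (F : Int → List Int) (ps : List (Int × List Int))
    (hF : ∀ p ∈ ps, p.2 = F p.1) (a : Int) (ks : List Int) :
    ps.foldl (fun acc kv => if kv.1 > acc.1 then (kv.1, kv.2) else acc) (a, ks) =
      ((ps.map (·.1)).foldl (fun b x => if x > b then x else b) a,
        if a < (ps.map (·.1)).foldl (fun b x => if x > b then x else b) a then
          F ((ps.map (·.1)).foldl (fun b x => if x > b then x else b) a)
        else ks) := by
  induction ps generalizing a ks with
  | nil =>
    simp only [List.foldl_nil, List.map_nil]
    rw [if_neg (lt_irrefl a)]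
  | cons p ps ih =>
    simp only [List.foldl_cons, List.map_cons]
    by_cases h : p.1 > a
    · rw [if_pos h, if_pos h,
        ih (fun q hq => hF q (List.mem_cons_of_mem _ hq)) p.1 p.2]
      have hle : p.1 ≤ (ps.map (·.1)).foldl (fun b x => if x > b then x else b) p.1 :=
        pvInit_le_maxfold _ _
      have ha : a < (ps.map (·.1)).foldl (fun b x => if x > b then x else b) p.1 :=
        lt_of_lt_of_le h hle
      rw [if_pos ha]
      by_cases h2 : p.1 < (ps.map (·.1)).foldl (fun b x => if x > b then x else b) p.1
      · rw [if_pos h2]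
      · rw [if_neg h2]
        have : (ps.map (·.1)).foldl (fun b x => if x > b then x else b) p.1 = p.1 :=
          le_antisymm (not_lt.1 h2) hle
        rw [this, hF p (by simp)]
    · rw [if_neg h, if_neg h,
        ih (fun q hq => hF q (List.mem_cons_of_mem _ hq)) a ks]

-- ===== VERDICT (by name: the statement is the Claim_ definition above) =====
theorem get_list_max_numbers_spec : Claim_equal_get_list_max_numbers := by
  intro l _
  unfold Spec_get_list_max_numbers get_list_max_numbers get_list_max_numbers_alt
  simp only []
  set F : Int → List Int := fun v => (l.filter (fun kv => kv.2 == v)).map (·.1) with hFdef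
  have hnodup : (l.foldl pvStepA PySem.Dict.empty).keys.Nodup :=
    pvNodupKeys_foldA l _ (by simp)
  have hitems : (l.foldl pvStepA PySem.Dict.empty).items =
      (l.foldl pvStepA PySem.Dict.empty).keys.map
        (fun k => (k, (l.foldl pvStepA PySem.Dict.empty).getD k [])) :=
    PySem.Dict.items_eq_map_keys _ hnodup []
  have hF : ∀ p ∈ (l.foldl pvStepA PySem.Dict.empty).items, p.2 = F p.1 := by
    intro p hp
    rw [hitems] at hp
    rcases List.mem_map.1 hp with ⟨k, hk, rfl⟩
    simpa [hFdef] using pvGetD_foldA l PySem.Dict.empty k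
  rw [pvPickFold F _ hF 0 []]
  have hkeys : (l.foldl pvStepA PySem.Dict.empty).items.map (·.1) =
      (l.foldl pvStepA PySem.Dict.empty).keys := rfl
  have hM : ((l.foldl pvStepA PySem.Dict.empty).items.map (·.1)).foldl
        (fun b x => if x > b then x else b) 0 =
      l.foldl (fun m kv => if kv.2 > m then kv.2 else m) 0 := by
    rw [hkeys, pvMaxfold_congr _ (l.map (·.2)) 0
      (fun x => by simpa using pvMemKeys_foldA l PySem.Dict.empty x)]
    rw [List.foldl_map]
  rw [hM]
  set M : Int := l.foldl (fun m kv => if kv.2 > m then kv.2 else m) 0 with hMdef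
  by_cases hpos : 0 < M
  · rw [if_pos hpos, if_pos hpos]
    simp [hFdef, List.map_map, Function.comp_def]
  · rw [if_neg hpos, if_neg hpos]
    simp
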